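-- pv_equiv track=rewrite | github.com/dongxiaohe/algorithm | leetcode/1417-Reformat-The-String.py | reformat
-- ===== SOURCE A (Python) =====
-- def reformat(s: str) -> str:
--     digits, chs = [], []
--     for ch in s:
--         if ch.isdigit(): digits.append(ch)
--         else: chs.append(ch)
--     if abs(len(digits) - len(chs)) > 1: return ""
--     res = []
--     if len(digits) > len(chs):
--         chs.append("")
--         for digit, ch in zip(digits, chs):
--             res.append(digit)
--             res.append(ch)
--     else:
--         digits.append("")
--         for digit, ch in zip(digits, chs):
--             res.append(ch)
--             res.append(digit)
--     return "".join(res)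
-- ===== SOURCE B (Python) =====
-- def reformat(s: str) -> str:
--     digits = [c for c in s if c.isdigit()]
--     letters = [c for c in s if not c.isdigit()]
--     if abs(len(digits) - len(letters)) > 1:
--         return ""
--     longer, shorter = (digits, letters) if len(digits) > len(letters) else (letters, digits)
--     res = [""] * len(s)
--     res[::2] = longer
--     res[1::2] = shorter
--     return "".join(res)
-- ===== Notes on version B (the rewrite author's own statement) =====
-- stated objective: idiomatic
-- what changed: Replaces the sentinel-append + zip pair loop with positional construction: the longer group is written to the even stride res[::2] and the shorter to the odd stride res[1::2], then joined.
import Mathlib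
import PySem

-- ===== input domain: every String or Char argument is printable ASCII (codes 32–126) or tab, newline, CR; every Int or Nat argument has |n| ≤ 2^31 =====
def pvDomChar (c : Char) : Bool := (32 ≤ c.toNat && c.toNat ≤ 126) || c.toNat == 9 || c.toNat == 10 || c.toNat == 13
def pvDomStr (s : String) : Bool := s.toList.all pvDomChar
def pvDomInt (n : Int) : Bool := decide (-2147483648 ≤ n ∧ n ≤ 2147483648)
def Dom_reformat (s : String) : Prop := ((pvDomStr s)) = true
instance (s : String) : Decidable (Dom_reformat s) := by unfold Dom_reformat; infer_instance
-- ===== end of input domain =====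

-- B builds the result positionally (longer group on the even stride, shorter on the odd stride)
-- instead of A's sentinel-append + zip pair loop; same O(n) cost, return value proved equal.

-- ===== PORT A =====
def reformat (s : String) : String :=
  -- for ch in s: if ch.isdigit(): digits.append(ch) else: chs.append(ch)
  let sep := s.toList.foldl
      (fun (p : List Char × List Char) ch =>
        if PySem.Chars.isdigit ch then (p.1 ++ [ch], p.2) else (p.1, p.2 ++ [ch]))
      ([], [])
  let digits := sep.1
  let chs := sep.2
  if ((digits.length : Int) - (chs.length : Int)).natAbs > 1 then ""
  else
    if digits.length > chs.length then
      -- chs.append(""); for digit, ch in zip(digits, chs): res += [digit, ch]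
      let res := ((digits.map (fun c => [c])).zip ((chs.map (fun c => [c])) ++ [([] : List Char)])).foldl
          (fun (r : List (List Char)) p => r ++ [p.1, p.2]) []
      String.ofList (PySem.Chars.join [] res)
    else
      -- digits.append(""); for digit, ch in zip(digits, chs): res += [ch, digit]
      let res := (((digits.map (fun c => [c])) ++ [([] : List Char)]).zip (chs.map (fun c => [c]))).foldl
          (fun (r : List (List Char)) p => r ++ [p.2, p.1]) []
      String.ofList (PySem.Chars.join [] res)

-- ===== PORT B =====
-- hand port of the stride assignment res[::2] = longer; res[1::2] = shorter followed by ''.join: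
-- exact when len longer ∈ {len shorter, len shorter + 1}, which the guard guarantees.
def pvWeave : List Char → List Char → List Char
  | [], ys => ys
  | x :: xs, ys => x :: pvWeave ys xs
termination_by xs ys => xs.length + ys.length
decreasing_by simp; omega

def reformat_alt (s : String) : String :=
  let digits := s.toList.filter (fun c => PySem.Chars.isdigit c)
  let letters := s.toList.filter (fun c => !PySem.Chars.isdigit c)
  if ((digits.length : Int) - (letters.length : Int)).natAbs > 1 then ""
  else if digits.length > letters.length then String.ofList (pvWeave digits letters)
  else String.ofList (pvWeave letters digits)

-- ===== PRECONDITION & SPEC =====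
def Spec_reformat (s : String) (out : String) : Prop := out = reformat_alt s
instance (s : String) (out : String) : Decidable (Spec_reformat s out) := by unfold Spec_reformat; infer_instance

-- ===== CLAIM (what is proved, stated in full; the proofs are below) =====
def Claim_equal_reformat : Prop := ∀ (s : String), Dom_reformat s → Spec_reformat s (reformat s)

-- ===== LEMMAS AND PROOFS =====

-- A's separating foldl is the pair of filters B uses.
lemma pvSep (l : List Char) (a b : List Char) :
    l.foldl (fun (p : List Char × List Char) ch =>
        if PySem.Chars.isdigit ch then (p.1 ++ [ch], p.2) else (p.1, p.2 ++ [ch])) (a, b)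
      = (a ++ l.filter (fun c => PySem.Chars.isdigit c),
         b ++ l.filter (fun c => !PySem.Chars.isdigit c)) := by
  induction l generalizing a b with
  | nil => simp
  | cons x xs ih =>
    by_cases h : PySem.Chars.isdigit x
    · simp [h, ih]
    · simp [h, ih]

-- the pair loop appends; as a flatMap
lemma pvFold {α β γ : Type} (f : α × β → List γ) (L : List (α × β)) (acc : List γ) :
    L.foldl (fun r p => r ++ f p) acc = acc ++ L.flatMap f := by
  induction L generalizing acc with
  | nil => simp
  | cons x xs ih => simp [ih]

-- "".join with empty separator is flatten
lemma pvJoinNil (l : List (List Char)) : PySem.Chars.join [] l = l.flatten := by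
  induction l with
  | nil => simp [PySem.Chars.join, List.intercalate]
  | cons a l ih =>
    cases l with
    | nil => simp [PySem.Chars.join, List.intercalate]
    | cons b l => simp_all [PySem.Chars.join, List.intercalate, List.intersperse]

-- digits-first branch: len d = len c + 1
lemma pvA : ∀ (d c : List Char), d.length = c.length + 1 →
    (((d.map (fun x => [x])).zip ((c.map (fun x => [x])) ++ [([] : List Char)])).flatMap
        (fun p => [p.1, p.2])).flatten = pvWeave d c := by
  intro d
  induction d with
  | nil => intro c h; simp at h
  | cons x xs ih =>
    intro c h
    cases c with
    | nil =>
      have hx : xs = [] := by simpa using h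
      subst hx; simp [pvWeave]
    | cons y ys =>
      have h' : xs.length = ys.length + 1 := by simpa using h
      simpa [pvWeave] using ih ys h'

-- letters-first branch: len c = len d or len d + 1
lemma pvB : ∀ (c d : List Char), (c.length = d.length ∨ c.length = d.length + 1) →
    ((((d.map (fun x => [x])) ++ [([] : List Char)]).zip (c.map (fun x => [x]))).flatMap
        (fun p => [p.2, p.1])).flatten = pvWeave c d := by
  intro c
  induction c with
  | nil =>
    intro d h
    have hd : d = [] := by
      cases d <;> simp_all
    subst hd; simp [pvWeave]
  | cons y ys ih =>
    intro d h
    cases d with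
    | nil =>
      have hy : ys = [] := by
        rcases h with h | h <;> simp_all
      subst hy; simp [pvWeave]
    | cons x xs =>
      have h' : ys.length = xs.length ∨ ys.length = xs.length + 1 := by
        rcases h with h | h
        · left; simpa using h
        · right; simpa using h
      simpa [pvWeave] using ih xs h'

-- ===== VERDICT (by name: the statement is the Claim_ definition above) =====
theorem reformat_spec : Claim_equal_reformat := by
  intro s _
  unfold Spec_reformat reformat reformat_alt
  simp only [pvSep, List.nil_append, pvFold, pvJoinNil]
  by_cases hg : (((s.toList.filter (fun c => PySem.Chars.isdigit c)).length : Int)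
      - ((s.toList.filter (fun c => !PySem.Chars.isdigit c)).length : Int)).natAbs > 1
  · simp [hg]
  · simp only [hg, if_false]
    by_cases hl : (s.toList.filter (fun c => PySem.Chars.isdigit c)).length
        > (s.toList.filter (fun c => !PySem.Chars.isdigit c)).length
    · have hlen : (s.toList.filter (fun c => PySem.Chars.isdigit c)).length
          = (s.toList.filter (fun c => !PySem.Chars.isdigit c)).length + 1 := by omega
      simp [hl, pvA _ _ hlen]
    · have hlen : (s.toList.filter (fun c => !PySem.Chars.isdigit c)).length
          = (s.toList.filter (fun c => PySem.Chars.isdigit c)).length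
        ∨ (s.toList.filter (fun c => !PySem.Chars.isdigit c)).length
          = (s.toList.filter (fun c => PySem.Chars.isdigit c)).length + 1 := by omega
      simp [hl, pvB _ _ hlen]
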